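-- pv_equiv track=rewrite | github.com/rum-yasuhiro/experiments_crosstalk_multitasking | utils/process_counts_distribution.py | separate_multi_counts
-- ===== SOURCE A (Python) =====
-- from typing import Union, List
--
-- def separate_multi_counts(counts: dict) -> List[dict]:
--     """Separate the distribution counts of multiple qc combined circuit
--
--     Args:
--         counts (dictionary): counts distribution of result of multi-programming
--
--     Returns:
--         List[dictionary]: list of each counts distribution of quantum computation
--     """
--     keys = list(counts.keys())
--     num_clbits = [len(clbit) for clbit in keys[0].split()]
--
--     # partial complete bitstrings
--     keys_each = [bitstrings(_clbits) for _clbits in num_clbits]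
--
--     # separate counts
--     pointer = 0
--     separated_counts = []
--     for p_clbit_list, num_p_clbit in zip(keys_each, num_clbits):
--         p_counts = {}
--         for p_clbit in p_clbit_list:
--             p_counts[p_clbit] = 0
--             for bitstr, value in counts.items():
--                 if bitstr[pointer : pointer + num_p_clbit] == p_clbit:
--                     p_counts[p_clbit] += value
--         separated_counts.append(p_counts)
--         pointer += num_p_clbit + 1
--
--     return separated_counts, num_clbits
--
-- def bitstrings(num_clbits: Union[int, List[int]]):
--     """Return ordered count keys."""
--     if isinstance(num_clbits, int):
--         return [bin(j)[2:].zfill(num_clbits) for j in range(2 ** num_clbits)]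
--
--     elif isinstance(num_clbits, list):
--         sum_clbits = int(sum(num_clbits))
--         _bitstrings = [bin(j)[2:].zfill(sum_clbits) for j in range(2 ** sum_clbits)]
--         spaced_bitstrings = []
--         for bits in _bitstrings:
--             counter = 0
--             spaced_bits = ""
--             bits = str(bits)
--             for num_bits_in_reg in num_clbits:
--                 end = counter + num_bits_in_reg
--                 reg_bits = bits[counter:end]
--                 spaced_bits += reg_bits
--                 if num_bits_in_reg == num_clbits[-1]:
--                     break
--                 spaced_bits += " "
--                 counter += end
--             spaced_bitstrings.append(spaced_bits)
--         return spaced_bitstrings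
-- ===== SOURCE B (Python) =====
-- def all_bitstrings(n):
--     """All bitstrings of length n, in ascending numeric order."""
--     if n == 0:
--         return [""]
--     return [b + rest for b in "01" for rest in all_bitstrings(n - 1)]
--
--
-- def separate_multi_counts(counts):
--     """Separate the distribution counts of multiple qc combined circuit."""
--     keys = list(counts.keys())
--     num_clbits = [len(clbit) for clbit in keys[0].split()]
--
--     # start position of each register's slice inside a combined key
--     pointers = []
--     start = 0
--     for n in num_clbits:
--         pointers.append(start)
--         start += n + 1
--
--     # zero-initialised distribution for every register
--     separated_counts = [{bits: 0 for bits in all_bitstrings(n)} for n in num_clbits]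
--
--     # single pass over the combined counts
--     for bitstr, value in counts.items():
--         for p_counts, pointer, n in zip(separated_counts, pointers, num_clbits):
--             sub = bitstr[pointer : pointer + n]
--             if sub in p_counts:
--                 p_counts[sub] += value
--
--     return separated_counts, num_clbits
-- ===== Notes on version B (the rewrite author's own statement) =====
-- stated objective: faster
-- what changed: A rescans the whole counts dict for every one of the 2^n candidate keys of every register (triple nested loop); B zero-initialises each register dict once (keys built by a recursive 0/1 product instead of bin().zfill()) and then makes a single pass over counts, slicing each combined key once per register and accumulating by dict lookup.
-- outside the precondition, e.g. on separate_multi_counts({}): A raises IndexError, B raises IndexError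
import Mathlib
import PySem

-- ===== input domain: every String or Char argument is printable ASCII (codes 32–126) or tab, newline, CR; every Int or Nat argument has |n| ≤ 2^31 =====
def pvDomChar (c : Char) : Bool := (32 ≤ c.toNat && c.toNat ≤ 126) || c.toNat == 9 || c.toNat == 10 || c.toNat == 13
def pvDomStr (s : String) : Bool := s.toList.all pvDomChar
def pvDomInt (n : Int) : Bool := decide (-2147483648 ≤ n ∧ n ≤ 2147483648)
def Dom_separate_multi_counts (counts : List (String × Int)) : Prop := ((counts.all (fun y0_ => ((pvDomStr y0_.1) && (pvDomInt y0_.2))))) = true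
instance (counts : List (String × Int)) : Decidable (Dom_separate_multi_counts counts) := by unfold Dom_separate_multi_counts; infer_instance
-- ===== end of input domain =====

-- B zero-initialises each register's dict once and accumulates in a single pass over counts,
-- instead of A's rescan of the whole counts dict for every candidate key of every register.

-- ===== PORT A =====

-- bitstrings(n) for an int n: [bin(j)[2:].zfill(n) for j in range(2 ** n)]
def pvBitstringsA (n : Nat) : List String :=
  (List.range (2 ^ n)).map (fun (j : Nat) =>
    PySem.Str.zfill (PySem.Str.slice (PySem.Int.pyBin (j : Int)) (some 2) none) (n : Int))

-- the body of A's outer register loop: p_counts = {}; for p_clbit in p_clbit_list: … inner scan of counts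
def pvRegA (counts : List (String × Int)) (pointer n : Nat) (ks : List String) :
    PySem.Dict String Int :=
  ks.foldl (fun d k =>
    counts.foldl (fun d' bv =>
      if PySem.Str.slice bv.1 (some (pointer : Int)) (some ((pointer + n : Nat) : Int)) = k
      then d'.modify k 0 (· + bv.2) else d')
      (d.insert k 0))
    PySem.Dict.empty

def separate_multi_counts (counts : List (String × Int)) :
    (List (List (String × Int))) × List Int :=
  match counts with
  | [] => ([], [])  -- keys[0] raises IndexError in Python; excluded by Pre_
  | (k0, _) :: _ =>
    let num_clbits := (PySem.Str.split₀ k0).map (fun t => t.toList.length)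
    let keys_each := num_clbits.map pvBitstringsA
    let res := (keys_each.zip num_clbits).foldl
      (fun (acc : List (List (String × Int)) × Nat) pn =>
        (acc.1 ++ [(pvRegA counts acc.2 pn.2 pn.1).items], acc.2 + pn.2 + 1))
      ([], 0)
    (res.1, num_clbits.map (fun (m : Nat) => (m : Int)))

-- ===== PORT B =====

-- all_bitstrings(n): recursive 0/1 product, ascending numeric order
def pvGenB : Nat → List (List Char)
  | 0 => [[]]
  | n + 1 => ['0', '1'].flatMap (fun b => (pvGenB n).map (fun rest => b :: rest))

-- {bits: 0 for bits in all_bitstrings(n)}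
def pvInitB (n : Nat) : PySem.Dict String Int :=
  (pvGenB n).foldl (fun d bits => d.insert (String.ofList bits) 0) PySem.Dict.empty

-- body of B's inner zip loop: slice once, accumulate on dict-membership
def pvStepB (bv : String × Int) (t : PySem.Dict String Int × Nat × Nat) :
    PySem.Dict String Int × Nat × Nat :=
  let sub := PySem.Str.slice bv.1 (some (t.2.1 : Int)) (some ((t.2.1 + t.2.2 : Nat) : Int))
  if t.1.contains sub then (t.1.modify sub 0 (· + bv.2), t.2) else t

def separate_multi_counts_alt (counts : List (String × Int)) :
    (List (List (String × Int))) × List Int :=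
  match counts with
  | [] => ([], [])  -- keys[0] raises IndexError in Python; excluded by Pre_
  | (k0, _) :: _ =>
    let num_clbits := (PySem.Str.split₀ k0).map (fun t => t.toList.length)
    let pointers := (num_clbits.foldl
      (fun (acc : List Nat × Nat) n => (acc.1 ++ [acc.2], acc.2 + n + 1)) ([], 0)).1
    let dists := num_clbits.map pvInitB
    let triples := dists.zip (pointers.zip num_clbits)
    let final := counts.foldl (fun ds bv => ds.map (pvStepB bv)) triples
    (final.map (fun t => t.1.items), num_clbits.map (fun (m : Nat) => (m : Int)))

-- ===== PRECONDITION & SPEC =====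
-- Python A evaluates keys[0]: on an empty counts dict it raises IndexError, so Pre_ excludes [].
def Pre_separate_multi_counts (counts : List (String × Int)) : Prop := counts ≠ []
instance (counts : List (String × Int)) : Decidable (Pre_separate_multi_counts counts) := by
  unfold Pre_separate_multi_counts; infer_instance

def pvWitness_separate_multi_counts : (List (String × Int)) := [("01 1", 3), ("11 0", 2)]

def Spec_separate_multi_counts (counts : List (String × Int))
    (out : (List (List (String × Int))) × List Int) : Prop :=
  out = separate_multi_counts_alt counts
instance (counts : List (String × Int)) (out : (List (List (String × Int))) × List Int) :
    Decidable (Spec_separate_multi_counts counts out) := by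
  unfold Spec_separate_multi_counts; infer_instance

-- ===== CLAIM (what is proved, stated in full; the proofs are below) =====
def Claim_equal_separate_multi_counts : Prop :=
  ∀ (counts : List (String × Int)), Dom_separate_multi_counts counts →
    Pre_separate_multi_counts counts →
    Spec_separate_multi_counts counts (separate_multi_counts counts)

-- ===== LEMMAS AND PROOFS =====

-- the per-entry contribution of a counts item to key k of the register at (p, n)
def pvDelta (p n : Nat) (k : String) (bv : String × Int) : Int :=
  if PySem.Str.slice bv.1 (some (p : Int)) (some ((p + n : Nat) : Int)) = k then bv.2 else 0

def pvTotal (counts : List (String × Int)) (p n : Nat) (k : String) : Int :=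
  ((counts.map (pvDelta p n k)).sum)

def pvKs (n : Nat) : List String := (pvGenB n).map String.ofList

def pvReg (counts : List (String × Int)) (p n : Nat) : List (String × Int) :=
  (pvKs n).map (fun k => (k, pvTotal counts p n k))

def pvCanon (counts : List (String × Int)) : List Nat → Nat → List (List (String × Int))
  | [], _ => []
  | n :: rest, p => pvReg counts p n :: pvCanon counts rest (p + n + 1)

-- ---- numeric bitstring machinery ----

-- Python's bin(j)[2:] digit loop, restated as structural recursion
def pvMyBits (n : Nat) : List Char :=
  if _h : n < 2 then [Nat.digitChar n]
  else pvMyBits (n / 2) ++ [Nat.digitChar (n % 2)]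
decreasing_by omega

-- the n-bit msb-first representation
def pvPure : Nat → Nat → List Char
  | 0, _ => []
  | w + 1, j => (if j < 2 ^ w then '0' else '1') :: pvPure w (j % 2 ^ w)

lemma pvToDigitsCore_shift (f : Nat) : ∀ (n : Nat) (l : List Char),
    Nat.toDigitsCore 2 f n l = Nat.toDigitsCore 2 f n [] ++ l := by
  induction f with
  | zero => intro n l; simp [Nat.toDigitsCore]
  | succ f ih =>
    intro n l
    simp only [Nat.toDigitsCore]
    by_cases h : n / 2 = 0
    · simp [h]
    · simp only [h, if_false]
      rw [ih (n / 2) ((n % 2).digitChar :: l), ih (n / 2) [(n % 2).digitChar]]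
      simp

lemma pvToDigitsCore_eq_myBits : ∀ (f n : Nat), n < f →
    Nat.toDigitsCore 2 f n [] = pvMyBits n := by
  intro f
  induction f with
  | zero => omega
  | succ f ih =>
    intro n hn
    simp only [Nat.toDigitsCore]
    by_cases h : n / 2 = 0
    · have h2 : n < 2 := by omega
      rw [if_pos h, pvMyBits, dif_pos h2, Nat.mod_eq_of_lt h2]
    · have h2 : ¬ n < 2 := by omega
      rw [if_neg h, pvToDigitsCore_shift, ih (n / 2) (by omega)]
      conv_rhs => rw [pvMyBits, dif_neg h2]

lemma pvToDigits_eq_myBits (n : Nat) : Nat.toDigits 2 n = pvMyBits n :=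
  pvToDigitsCore_eq_myBits (n + 1) n (by omega)

lemma pvMyBits_chars (n : Nat) : ∀ c ∈ pvMyBits n, c = '0' ∨ c = '1' := by
  induction n using Nat.strong_induction_on with
  | _ n ih =>
    rw [pvMyBits]
    by_cases h : n < 2
    · rw [dif_pos h]
      intro c hc
      simp only [List.mem_singleton] at hc
      subst hc
      interval_cases n <;> decide
    · rw [dif_neg h]
      intro c hc
      rcases List.mem_append.mp hc with hc | hc
      · exact ih (n / 2) (by omega) c hc
      · simp only [List.mem_singleton] at hc
        subst hc
        have h2 : n % 2 = 0 ∨ n % 2 = 1 := by omega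
        rcases h2 with h2 | h2 <;> rw [h2] <;> decide

lemma pvMyBits_ne_nil (n : Nat) : pvMyBits n ≠ [] := by
  rw [pvMyBits]
  by_cases h : n < 2
  · rw [dif_pos h]; simp
  · rw [dif_neg h]; simp

lemma pvMyBits_len : ∀ (v n : Nat), n < 2 ^ (v + 1) → (pvMyBits n).length ≤ v + 1 := by
  intro v
  induction v with
  | zero =>
    intro n hn
    have : n < 2 := by simpa using hn
    rw [pvMyBits]; simp [this]
  | succ v ih =>
    intro n hn
    rw [pvMyBits]
    by_cases h : n < 2
    · rw [dif_pos h]; simp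
    · have h2 : (2:Nat) ^ (v + 2) = 2 * 2 ^ (v + 1) := by ring
      have hd : n / 2 < 2 ^ (v + 1) := by omega
      rw [dif_neg h, List.length_append, List.length_singleton]
      have := ih (n / 2) hd
      omega

lemma pvZfill_eq_replicate (cs : List Char) (w : Nat) (hne : cs ≠ [])
    (hc : ∀ c ∈ cs, c = '0' ∨ c = '1') :
    PySem.Chars.zfill cs (w : Int) = List.replicate (w - cs.length) '0' ++ cs := by
  unfold PySem.Chars.zfill
  by_cases h : ((w : Int)) ≤ (cs.length : Int)
  · have hz : w - cs.length = 0 := by omega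
    rw [if_pos h, hz]
    simp
  · rw [if_neg h]
    cases cs with
    | nil => exact absurd rfl hne
    | cons c rest =>
      have hc0 : c = '0' ∨ c = '1' := hc c (by simp)
      have hcs : ¬ (c = '+' ∨ c = '-') := by rcases hc0 with h' | h' <;> simp [h']
      have ht : ((w : Int)).toNat = w := by omega
      change (if c = '+' ∨ c = '-'
          then c :: (List.replicate (((w : Int)).toNat - (c :: rest).length) '0' ++ rest)
          else List.replicate (((w : Int)).toNat - (c :: rest).length) '0' ++ (c :: rest)) = _
      rw [if_neg hcs, ht]

lemma pvPure_append : ∀ (w j : Nat), j < 2 ^ (w + 1) →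
    pvPure (w + 1) j = pvPure w (j / 2) ++ [Nat.digitChar (j % 2)] := by
  intro w
  induction w with
  | zero =>
    intro j hj
    have : j < 2 := by simpa using hj
    interval_cases j <;> simp [pvPure, Nat.digitChar]
  | succ w ih =>
    intro j hj
    have h2 : (2:Nat) ^ (w + 1) = 2 * 2 ^ w := by ring
    have h3 : (2:Nat) ^ (w + 2) = 2 * 2 ^ (w + 1) := by ring
    have hmod : j % 2 ^ (w + 1) < 2 ^ (w + 1) := Nat.mod_lt _ (by positivity)
    have e1 : (j % 2 ^ (w + 1)) % 2 = j % 2 :=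
      Nat.mod_mod_of_dvd j ⟨2 ^ w, by ring⟩
    have e2 : (j % 2 ^ (w + 1)) / 2 = (j / 2) % 2 ^ w := by
      have := Nat.mod_mul_right_div_self j 2 (2 ^ w)
      rwa [← h2] at this
    have e3 : (j < 2 ^ (w + 1)) ↔ (j / 2 < 2 ^ w) := by omega
    show (if j < 2 ^ (w + 1) then '0' else '1') :: pvPure (w + 1) (j % 2 ^ (w + 1)) = _
    rw [ih (j % 2 ^ (w + 1)) hmod, e1, e2]
    show _ = (if j / 2 < 2 ^ w then '0' else '1') :: pvPure w ((j / 2) % 2 ^ w) ++ _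
    by_cases hb : j < 2 ^ (w + 1)
    · simp only [if_pos hb, if_pos (e3.mp hb), List.cons_append]
    · simp only [if_neg hb, if_neg (by omega : ¬ j / 2 < 2 ^ w), List.cons_append]

lemma pvRep_eq_pure : ∀ (v j : Nat), j < 2 ^ (v + 1) →
    List.replicate ((v + 1) - (pvMyBits j).length) '0' ++ pvMyBits j = pvPure (v + 1) j := by
  intro v
  induction v with
  | zero =>
    intro j hj
    have : j < 2 := by simpa using hj
    interval_cases j <;> · rw [pvMyBits]; decide
  | succ v ih =>
    intro j hj
    have h3 : (2:Nat) ^ (v + 2) = 2 * 2 ^ (v + 1) := by ring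
    rw [pvPure_append (v + 1) j hj]
    by_cases h : j < 2
    · have hj2 : j / 2 = 0 := by omega
      have hjm : j % 2 = j := by omega
      rw [hj2, hjm]
      have h0 : pvMyBits 0 = ['0'] := by rw [pvMyBits]; decide
      have := ih 0 (by positivity)
      rw [h0] at this
      simp only [List.length_singleton] at this
      rw [← this]
      conv_lhs => rw [pvMyBits, dif_pos h]
      simp only [List.length_singleton]
      rw [(by omega : v + 2 - 1 = (v + 1 - 1) + 1), List.replicate_succ']
    · have hd : j / 2 < 2 ^ (v + 1) := by omega
      have hlen : (pvMyBits (j / 2)).length ≤ v + 1 := pvMyBits_len v (j / 2) hd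
      conv_lhs => rw [pvMyBits, dif_neg h]
      simp only [List.length_append, List.length_singleton]
      rw [← ih (j / 2) hd, ← List.append_assoc,
        (by omega : v + 2 - ((pvMyBits (j / 2)).length + 1) = v + 1 - (pvMyBits (j / 2)).length)]

lemma pvGenB_eq_pure : ∀ w : Nat, pvGenB w = (List.range (2 ^ w)).map (pvPure w) := by
  intro w
  induction w with
  | zero => simp [pvGenB, pvPure]
  | succ w ih =>
    have h2 : (2:Nat) ^ (w + 1) = 2 ^ w + 2 ^ w := by ring
    rw [pvGenB, ih, h2, List.range_add]
    simp only [List.map_append, List.map_map, List.flatMap_cons, List.flatMap_nil,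
      List.map_map, List.append_nil]
    congr 1
    · apply List.map_congr_left
      intro j hj
      have hj' : j < 2 ^ w := List.mem_range.mp hj
      show '0' :: pvPure w j = pvPure (w + 1) j
      show _ = (if j < 2 ^ w then '0' else '1') :: pvPure w (j % 2 ^ w)
      rw [if_pos hj', Nat.mod_eq_of_lt hj']
    · apply List.map_congr_left
      intro j hj
      have hj' : j < 2 ^ w := List.mem_range.mp hj
      show '1' :: pvPure w j = pvPure (w + 1) (2 ^ w + j)
      show _ = (if 2 ^ w + j < 2 ^ w then '0' else '1') :: pvPure w ((2 ^ w + j) % 2 ^ w)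
      rw [if_neg (by omega), Nat.add_mod_left, Nat.mod_eq_of_lt hj']

lemma pvBitstringsA_eq_ks (n : Nat) (hn : 1 ≤ n) : pvBitstringsA n = pvKs n := by
  obtain ⟨v, rfl⟩ : ∃ v, n = v + 1 := ⟨n - 1, by omega⟩
  unfold pvBitstringsA pvKs
  rw [pvGenB_eq_pure, List.map_map]
  apply List.map_congr_left
  intro j hj
  have hj' : j < 2 ^ (v + 1) := List.mem_range.mp hj
  have hbin : PySem.Str.slice (PySem.Int.pyBin (j : Int)) (some 2) none
      = String.ofList (pvMyBits j) := by
    unfold PySem.Str.slice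
    congr 1
    rw [PySem.Int.toList_pyBin]
    unfold PySem.Int.toBinChars0b
    rw [if_neg (by omega : ¬ ((j : Int)) < 0), PySem.Chars.slice_eq_listSlice]
    rw [PySem.List.slice_from _ (by norm_num : (0:Int) ≤ 2)]
    have h2 : ((2:Int)).toNat = 2 := rfl
    rw [h2]
    have hN : ((j : Int)).toNat = j := by omega
    rw [hN]
    simp [pvToDigits_eq_myBits]
  unfold PySem.Str.zfill
  rw [hbin]
  simp only [Function.comp_apply, String.toList_ofList]
  rw [pvZfill_eq_replicate (pvMyBits j) (v + 1) (pvMyBits_ne_nil j) (pvMyBits_chars j),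
    pvRep_eq_pure v j hj']

-- ---- key-list facts ----

lemma pvGenB_nodup (n : Nat) : (pvGenB n).Nodup := by
  induction n with
  | zero => simp [pvGenB]
  | succ n ih =>
    simp only [pvGenB, List.flatMap_cons, List.flatMap_nil, List.append_nil]
    apply List.Nodup.append
    · exact ih.map (fun a b h => by simpa using h)
    · exact ih.map (fun a b h => by simpa using h)
    · intro x hx hy
      simp only [List.mem_map] at hx hy
      obtain ⟨a, _, rfl⟩ := hx
      obtain ⟨b, _, hb⟩ := hy
      simp at hb

lemma pvKs_nodup (n : Nat) : (pvKs n).Nodup :=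
  (pvGenB_nodup n).map (fun a b h => by
    have := congrArg String.toList h
    simpa using this)

-- ---- dict item-level lemmas ----

lemma pvContains_mk (items : List (String × Int)) (k : String) :
    (PySem.Dict.mk items).contains k = items.any (fun p => p.1 == k) := rfl

lemma pvInsert_fresh (items : List (String × Int)) (k : String) (v : Int)
    (h : ∀ q ∈ items, q.1 ≠ k) :
    (PySem.Dict.mk items).insert k v = PySem.Dict.mk (items ++ [(k, v)]) := by
  unfold PySem.Dict.insert
  have : (PySem.Dict.mk items).contains k = false := by
    rw [pvContains_mk]
    simp only [List.any_eq_false]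
    intro p hp
    simpa using h p hp
  simp [this]

lemma pvFind_none (items : List (String × Int)) (k : String)
    (h : ∀ q ∈ items, q.1 ≠ k) :
    items.find? (fun p => p.1 == k) = none := by
  rw [List.find?_eq_none]
  intro p hp
  simpa using h p hp

lemma pvGetD_last (pre : List (String × Int)) (k : String) (a : Int)
    (h : ∀ q ∈ pre, q.1 ≠ k) :
    (PySem.Dict.mk (pre ++ [(k, a)])).getD k 0 = a := by
  unfold PySem.Dict.getD PySem.Dict.get?
  rw [List.find?_append, pvFind_none pre k h]
  simp

lemma pvModify_last (pre : List (String × Int)) (k : String) (a : Int) (f : Int → Int)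
    (h : ∀ q ∈ pre, q.1 ≠ k) :
    (PySem.Dict.mk (pre ++ [(k, a)])).modify k 0 f = PySem.Dict.mk (pre ++ [(k, f a)]) := by
  unfold PySem.Dict.modify
  rw [pvGetD_last pre k a h]
  unfold PySem.Dict.insert
  have hc : (PySem.Dict.mk (pre ++ [(k, a)])).contains k = true := by
    rw [pvContains_mk]
    simp
  simp only [hc, if_true]
  congr 1
  simp only [List.map_append]
  congr 1
  · have hid : ∀ q ∈ pre, (fun p => if (p.1 == k) = true then (k, f a) else p) q = q := by
      intro q hq
      simp [show (q.1 == k) = false by simpa using h q hq]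
    rw [List.map_congr_left hid]
    simp
  · simp

-- ---- A-side register characterisation ----

lemma pvRegA_inner (pointer n : Nat) (k : String) :
    ∀ (counts : List (String × Int)) (pre : List (String × Int)) (a : Int),
    (∀ q ∈ pre, q.1 ≠ k) →
    counts.foldl (fun d' bv =>
      if PySem.Str.slice bv.1 (some (pointer : Int)) (some ((pointer + n : Nat) : Int)) = k
      then d'.modify k 0 (· + bv.2) else d') (PySem.Dict.mk (pre ++ [(k, a)]))
    = PySem.Dict.mk (pre ++ [(k, a + pvTotal counts pointer n k)]) := by
  intro counts
  induction counts with
  | nil => intro pre a h; simp [pvTotal]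
  | cons bv rest ih =>
    intro pre a h
    simp only [List.foldl_cons]
    have htot : pvTotal (bv :: rest) pointer n k
        = pvDelta pointer n k bv + pvTotal rest pointer n k := by
      simp [pvTotal]
    by_cases hc : PySem.Str.slice bv.1 (some (pointer : Int)) (some ((pointer + n : Nat) : Int)) = k
    · rw [if_pos hc, pvModify_last pre k a _ h, ih pre (a + bv.2) h, htot]
      have hd : pvDelta pointer n k bv = bv.2 := by unfold pvDelta; rw [if_pos hc]
      rw [hd]; ring_nf
    · rw [if_neg hc, ih pre a h, htot]
      have hd : pvDelta pointer n k bv = 0 := by unfold pvDelta; rw [if_neg hc]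
      rw [hd]; ring_nf

lemma pvRegA_outer (counts : List (String × Int)) (pointer n : Nat) :
    ∀ (ks : List String) (acc : List (String × Int)),
    ks.Nodup → (∀ k ∈ ks, ∀ q ∈ acc, q.1 ≠ k) →
    ks.foldl (fun d k =>
      counts.foldl (fun d' bv =>
        if PySem.Str.slice bv.1 (some (pointer : Int)) (some ((pointer + n : Nat) : Int)) = k
        then d'.modify k 0 (· + bv.2) else d') (d.insert k 0)) (PySem.Dict.mk acc)
    = PySem.Dict.mk (acc ++ ks.map (fun k => (k, pvTotal counts pointer n k))) := by
  intro ks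
  induction ks with
  | nil => intro acc _ _; simp
  | cons k ks ih =>
    intro acc hnd hdisj
    simp only [List.foldl_cons]
    rw [pvInsert_fresh acc k 0 (hdisj k (by simp)),
      pvRegA_inner pointer n k counts acc 0 (hdisj k (by simp)), zero_add]
    rw [ih (acc ++ [(k, pvTotal counts pointer n k)]) (List.nodup_cons.mp hnd).2]
    · simp
    · intro k' hk' q hq
      rcases List.mem_append.mp hq with hq | hq
      · exact hdisj k' (List.mem_cons_of_mem k hk') q hq
      · simp only [List.mem_singleton] at hq
        subst hq
        intro hkk
        have hkk' : k = k' := hkk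
        exact (List.nodup_cons.mp hnd).1 (hkk' ▸ hk')

lemma pvRegA_items (counts : List (String × Int)) (p n : Nat) (hn : 1 ≤ n) :
    (pvRegA counts p n (pvBitstringsA n)).items = pvReg counts p n := by
  unfold pvRegA
  rw [pvBitstringsA_eq_ks n hn,
    show (PySem.Dict.empty : PySem.Dict String Int) = PySem.Dict.mk [] from rfl,
    pvRegA_outer counts p n (pvKs n) [] (pvKs_nodup n) (by simp)]
  simp [pvReg]

-- ---- B-side register characterisation ----

lemma pvInitB_items : ∀ (l : List (List Char)) (acc : List (String × Int)),
    (l.map String.ofList).Nodup → (∀ b ∈ l, ∀ q ∈ acc, q.1 ≠ String.ofList b) →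
    l.foldl (fun d bits => d.insert (String.ofList bits) 0) (PySem.Dict.mk acc)
    = PySem.Dict.mk (acc ++ l.map (fun b => (String.ofList b, (0:Int)))) := by
  intro l
  induction l with
  | nil => intro acc _ _; simp
  | cons b l ih =>
    intro acc hnd hdisj
    simp only [List.foldl_cons]
    rw [pvInsert_fresh acc _ 0 (hdisj b (by simp))]
    rw [ih (acc ++ [(String.ofList b, 0)]) (by simpa using (List.nodup_cons.mp (by simpa using hnd)).2)]
    · simp
    · intro b' hb' q hq
      rcases List.mem_append.mp hq with hq | hq
      · exact hdisj b' (by simp [hb']) q hq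
      · simp only [List.mem_singleton] at hq
        subst hq
        intro hkk
        have hnd' := List.nodup_cons.mp (by simpa using hnd : ((String.ofList b) :: l.map String.ofList).Nodup)
        have hkk' : String.ofList b = String.ofList b' := hkk
        apply hnd'.1
        rw [hkk']
        exact List.mem_map_of_mem hb'

lemma pvFind_map_nodup (ks : List String) (v : String → Int) (k : String)
    (hnd : ks.Nodup) (hk : k ∈ ks) :
    (ks.map (fun k => (k, v k))).find? (fun p => p.1 == k) = some (k, v k) := by
  induction ks with
  | nil => simp at hk
  | cons a ks ih =>
    simp only [List.map_cons, List.find?_cons]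
    by_cases h : a = k
    · subst h; simp
    · simp only [show (a == k) = false by simpa using h]
      exact ih (List.nodup_cons.mp hnd).2 (by rcases List.mem_cons.mp hk with h' | h' <;> [exact absurd h'.symm h; exact h'])

lemma pvDictAdd (ks : List String) (v : String → Int) (sub : String) (x : Int)
    (hnd : ks.Nodup) :
    (if (PySem.Dict.mk (ks.map (fun k => (k, v k)))).contains sub
     then (PySem.Dict.mk (ks.map (fun k => (k, v k)))).modify sub 0 (· + x)
     else PySem.Dict.mk (ks.map (fun k => (k, v k))))
    = PySem.Dict.mk (ks.map (fun k => (k, v k + if sub = k then x else 0))) := by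
  by_cases hmem : sub ∈ ks
  · have hc : (PySem.Dict.mk (ks.map (fun k => (k, v k)))).contains sub = true := by
      rw [pvContains_mk]
      simp only [List.any_eq_true]
      exact ⟨(sub, v sub), List.mem_map_of_mem hmem, by simp⟩
    rw [if_pos hc]
    unfold PySem.Dict.modify PySem.Dict.getD PySem.Dict.get?
    rw [pvFind_map_nodup ks v sub hnd hmem]
    simp only [Option.map_some, Option.getD_some]
    unfold PySem.Dict.insert
    rw [if_pos hc]
    apply PySem.Dict.ext
    simp only [List.map_map]
    apply List.map_congr_left
    intro k hk
    by_cases hks : sub = k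
    · subst hks
      simp
    · have hbk : (k == sub) = false := by simpa using fun h => hks h.symm
      show (if (k == sub) = true then (sub, v sub + x) else (k, v k))
          = (k, v k + if sub = k then x else 0)
      rw [hbk, if_neg (by simp), if_neg hks, add_zero]
  · have hc : (PySem.Dict.mk (ks.map (fun k => (k, v k)))).contains sub = false := by
      rw [pvContains_mk]
      simp only [List.any_eq_false]
      rintro ⟨a, w⟩ haw
      obtain ⟨k', hk', he⟩ := List.mem_map.mp haw
      simp only [Prod.mk.injEq] at he
      simp only [beq_iff_eq]
      intro hks
      exact hmem (by rw [← hks, ← he.1]; exact hk')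
    simp only [hc, Bool.false_eq_true, if_false]
    apply PySem.Dict.ext
    simp only
    apply List.map_congr_left
    intro k hk
    rw [if_neg (fun h => hmem (by rw [h]; exact hk)), add_zero]

lemma pvStepB_reg (p n : Nat) (ks : List String) (hnd : ks.Nodup) :
    ∀ (counts : List (String × Int)) (v : String → Int),
    counts.foldl (fun t bv => pvStepB bv t)
      (PySem.Dict.mk (ks.map (fun k => (k, v k))), p, n)
    = (PySem.Dict.mk (ks.map (fun k => (k, v k + pvTotal counts p n k))), p, n) := by
  intro counts
  induction counts with
  | nil =>
    intro v
    simp only [List.foldl_nil]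
    congr 1
    apply PySem.Dict.ext
    simp [pvTotal]
  | cons bv rest ih =>
    intro v
    simp only [List.foldl_cons]
    have hstep : pvStepB bv (PySem.Dict.mk (ks.map (fun k => (k, v k))), p, n)
        = (PySem.Dict.mk (ks.map (fun k => (k, v k + pvDelta p n k bv))), p, n) := by
      show (if (PySem.Dict.mk (ks.map (fun k => (k, v k)))).contains
              (PySem.Str.slice bv.1 (some (p : Int)) (some ((p + n : Nat) : Int)))
            then ((PySem.Dict.mk (ks.map (fun k => (k, v k)))).modify
              (PySem.Str.slice bv.1 (some (p : Int)) (some ((p + n : Nat) : Int))) 0 (· + bv.2), p, n)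
            else (PySem.Dict.mk (ks.map (fun k => (k, v k))), p, n)) = _
      rw [← apply_ite (fun d => (d, p, n))]
      unfold pvDelta
      exact congrArg (fun d => (d, p, n))
        (pvDictAdd ks v (PySem.Str.slice bv.1 (some (p : Int)) (some ((p + n : Nat) : Int))) bv.2 hnd)
    rw [hstep, ih (fun k => v k + pvDelta p n k bv)]
    congr 1
    apply PySem.Dict.ext
    simp only
    apply List.map_congr_left
    intro k hk
    have htot : pvTotal (bv :: rest) p n k = pvDelta p n k bv + pvTotal rest p n k := by
      simp [pvTotal]
    rw [htot]
    ring_nf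

-- ---- assembling both sides over the list of widths ----

def pvPtrList : List Nat → Nat → List Nat
  | [], _ => []
  | n :: rest, s => s :: pvPtrList rest (s + n + 1)

lemma pvPointers_eq : ∀ (ws : List Nat) (acc : List Nat) (s : Nat),
    (ws.foldl (fun (acc : List Nat × Nat) n => (acc.1 ++ [acc.2], acc.2 + n + 1)) (acc, s)).1
    = acc ++ pvPtrList ws s := by
  intro ws
  induction ws with
  | nil => intro acc s; simp [pvPtrList]
  | cons n rest ih =>
    intro acc s
    simp only [List.foldl_cons]
    rw [ih (acc ++ [s]) (s + n + 1)]
    simp [pvPtrList]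

lemma pvFoldMap_comm {T : Type} : ∀ (counts : List (String × Int)) (ts : List T)
    (g : (String × Int) → T → T),
    counts.foldl (fun ds bv => ds.map (g bv)) ts
    = ts.map (fun t => counts.foldl (fun t bv => g bv t) t) := by
  intro counts
  induction counts with
  | nil => intro ts g; simp
  | cons bv rest ih =>
    intro ts g
    simp only [List.foldl_cons]
    rw [ih (ts.map (g bv)) g, List.map_map]
    rfl

lemma pvB_main (counts : List (String × Int)) : ∀ (ws : List Nat) (s : Nat),
    (((ws.map pvInitB).zip ((pvPtrList ws s).zip ws)).map
      (fun t => counts.foldl (fun t bv => pvStepB bv t) t)).map (fun t => t.1.items)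
    = pvCanon counts ws s := by
  intro ws
  induction ws with
  | nil => intro s; simp [pvPtrList, pvCanon]
  | cons n rest ih =>
    intro s
    show ((((pvInitB n, s, n) ::
        (rest.map pvInitB).zip ((pvPtrList rest (s + n + 1)).zip rest)).map
      (fun t => counts.foldl (fun t bv => pvStepB bv t) t)).map (fun t => t.1.items))
      = pvReg counts s n :: pvCanon counts rest (s + n + 1)
    simp only [List.map_cons]
    rw [ih (s + n + 1)]
    congr 1
    have hinit : pvInitB n = PySem.Dict.mk ((pvKs n).map (fun k => (k, (0:Int)))) := by
      unfold pvInitB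
      rw [show (PySem.Dict.empty : PySem.Dict String Int) = PySem.Dict.mk [] from rfl,
        pvInitB_items (pvGenB n) [] (pvKs_nodup n) (by simp)]
      unfold pvKs
      rw [List.map_map]
      simp
    rw [hinit, pvStepB_reg s n (pvKs n) (pvKs_nodup n) counts (fun _ => 0)]
    unfold pvReg
    simp only
    apply List.map_congr_left
    intro k hk
    rw [zero_add]

lemma pvA_main (counts : List (String × Int)) : ∀ (ws : List Nat)
    (acc : List (List (String × Int))) (s : Nat), (∀ n ∈ ws, 1 ≤ n) →
    (((ws.map pvBitstringsA).zip ws).foldl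
      (fun (acc : List (List (String × Int)) × Nat) pn =>
        (acc.1 ++ [(pvRegA counts acc.2 pn.2 pn.1).items], acc.2 + pn.2 + 1)) (acc, s)).1
    = acc ++ pvCanon counts ws s := by
  intro ws
  induction ws with
  | nil => intro acc s _; simp [pvCanon]
  | cons n rest ih =>
    intro acc s hws
    simp only [List.map_cons, List.zip_cons_cons, List.foldl_cons]
    rw [ih (acc ++ [(pvRegA counts s n (pvBitstringsA n)).items]) (s + n + 1)
      (fun m hm => hws m (by simp [hm]))]
    rw [pvRegA_items counts s n (hws n (by simp))]
    simp [pvCanon]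

-- token of str.split() are nonempty
lemma pvSplitGo_ne_nil : ∀ (s cur : List Char) (acc : List (List Char)),
    (∀ t ∈ acc, t ≠ []) → ∀ t ∈ PySem.Chars.split₀.go s cur acc, t ≠ [] := by
  intro s
  induction s with
  | nil =>
    intro cur acc hacc t ht
    simp only [PySem.Chars.split₀.go] at ht
    by_cases h : cur.isEmpty
    · simp only [h, if_true, List.mem_reverse] at ht
      exact hacc t ht
    · rw [if_neg (by simp [h])] at ht
      simp only [List.mem_reverse, List.mem_cons] at ht
      rcases ht with ht | ht
      · subst ht; simp only [ne_eq, List.reverse_eq_nil_iff]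
        intro hc; rw [hc] at h; simp at h
      · exact hacc t ht
  | cons c rest ih =>
    intro cur acc hacc t ht
    simp only [PySem.Chars.split₀.go] at ht
    by_cases hsp : PySem.Chars.isspace c
    · simp only [hsp, if_true] at ht
      by_cases h : cur.isEmpty
      · simp only [h, if_true] at ht
        exact ih [] acc hacc t ht
      · rw [if_neg (by simp [h])] at ht
        refine ih [] (cur.reverse :: acc) ?_ t ht
        intro u hu
        rcases List.mem_cons.mp hu with hu | hu
        · subst hu; simp only [ne_eq, List.reverse_eq_nil_iff]
          intro hc; rw [hc] at h; simp at h
        · exact hacc u hu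
    · rw [if_neg (by simp [hsp])] at ht
      exact ih (c :: cur) acc hacc t ht

lemma pvSplit_len (k0 : String) :
    ∀ n ∈ (PySem.Str.split₀ k0).map (fun t => t.toList.length), 1 ≤ n := by
  intro n hn
  obtain ⟨t, ht, rfl⟩ := List.mem_map.mp hn
  unfold PySem.Str.split₀ at ht
  obtain ⟨cs, hcs, rfl⟩ := List.mem_map.mp ht
  have := pvSplitGo_ne_nil k0.toList [] [] (by simp) cs hcs
  rw [String.toList_ofList]
  cases cs with
  | nil => exact absurd rfl this
  | cons a b => simp

-- ===== VERDICT (by name: the statement is the Claim_ definition above) =====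
theorem separate_multi_counts_spec : Claim_equal_separate_multi_counts := by
  intro counts _ hpre
  unfold Spec_separate_multi_counts
  match counts, hpre with
  | (k0, v0) :: rest, _ =>
    unfold separate_multi_counts separate_multi_counts_alt
    simp only
    set cnts := (k0, v0) :: rest with hcnts
    set ws := (PySem.Str.split₀ k0).map (fun t => t.toList.length) with hws
    have hws1 : ∀ n ∈ ws, 1 ≤ n := pvSplit_len k0
    have hA := pvA_main cnts ws [] 0 hws1
    have hPtr := pvPointers_eq ws [] 0
    have hB := pvB_main cnts ws 0
    rw [pvFoldMap_comm] at *
    simp only [List.nil_append] at hA hPtr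
    rw [hPtr]
    rw [hA, hB]
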